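-- pv_equiv track=rewrite | github.com/BradRobin/numerology-betting-app | app.py | calculate_name_numerology
-- ===== SOURCE A (Python) =====
-- def calculate_name_numerology(name):
--     letter_conversions = {
--         'A': 1, 'B': 2, 'C': 3, 'D': 4, 'E': 5, 'F': 6, 'G': 7, 'H': 8, 'I': 9, 'J': 1, 'K': 2, 'L': 3,
--         'M': 4, 'N': 5, 'O': 6, 'P': 7, 'Q': 8, 'R': 9, 'S': 1, 'T': 2, 'U': 3, 'V': 4, 'W': 5, 'X': 6,
--         'Y': 7, 'Z': 8
--     }
--
--     # Convert name to uppercase for consistency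
--     name = name.upper()
--
--     # Calculate the numerology by summing the values of each letter
--     numerology_sum = sum(letter_conversions[char] for char in name if char in letter_conversions)
--
--     # Reduce the sum to a single digit (life path number)
--     while numerology_sum > 9:
--         numerology_sum = sum(int(digit) for digit in str(numerology_sum))
--
--     return numerology_sum
-- ===== SOURCE B (Python) =====
-- def calculate_name_numerology(name):
--     # Per-letter value computed arithmetically; digit reduction by closed-form digital root.
--     total = sum((ord(c) - ord('A')) % 9 + 1 for c in name.upper() if 'A' <= c <= 'Z')
--     return 0 if total == 0 else 1 + (total - 1) % 9
-- ===== Notes on version B (the rewrite author's own statement) =====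
-- stated objective: simpler
-- what changed: The 26-entry letter->value dict is replaced by an arithmetic formula on the letter's alphabet offset (offset mod 9 plus 1), and the whole while-loop digit-reduction is replaced by the closed-form digital root 1+(sum-1)%9 (0 for letter-free names).
import Mathlib
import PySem

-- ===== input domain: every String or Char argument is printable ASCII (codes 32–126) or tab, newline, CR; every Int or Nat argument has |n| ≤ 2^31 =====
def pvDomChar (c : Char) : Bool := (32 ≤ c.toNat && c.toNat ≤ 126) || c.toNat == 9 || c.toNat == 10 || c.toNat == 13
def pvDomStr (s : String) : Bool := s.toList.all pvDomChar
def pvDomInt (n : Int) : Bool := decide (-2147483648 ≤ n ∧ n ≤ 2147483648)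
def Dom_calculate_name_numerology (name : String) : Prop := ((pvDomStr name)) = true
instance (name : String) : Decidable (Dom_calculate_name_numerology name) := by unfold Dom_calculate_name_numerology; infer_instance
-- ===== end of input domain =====

-- B replaces A's letter->value dict by the formula (ord(c)-ord('A'))%9+1 and A's while-loop
-- digit reduction by the closed-form digital root 1+(sum-1)%9 (0 when no letters): simpler, no loop.

-- ===== PORT A =====
def pvLetterConversions : PySem.Dict Char Int := PySem.Dict.ofList
  [('A',1),('B',2),('C',3),('D',4),('E',5),('F',6),('G',7),('H',8),('I',9),('J',1),('K',2),('L',3),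
   ('M',4),('N',5),('O',6),('P',7),('Q',8),('R',9),('S',1),('T',2),('U',3),('V',4),('W',5),('X',6),
   ('Y',7),('Z',8)]

-- int(digit) for a single character of str(n); total here because str(n) only yields digit chars
def pvIntOfDigit (c : Char) : Int := (PySem.Int.ofChars? [c]).getD 0

-- sum(int(digit) for digit in str(numerology_sum))
def pvDigitSum (n : Int) : Int := ((PySem.Int.toChars n).map pvIntOfDigit).sum

-- the 'while numerology_sum > 9' loop; fuel only totalizes it (s.toNat + 1 always suffices)
def pvReduce : Nat → Int → Int
  | 0, s => s
  | f + 1, s => if 9 < s then pvReduce f (pvDigitSum s) else s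

def calculate_name_numerology (name : String) : Int :=
  let nameU := PySem.Str.upper name
  let s := (nameU.toList.filterMap (fun c => pvLetterConversions.get? c)).sum
  pvReduce (s.toNat + 1) s

-- ===== PORT B =====
def calculate_name_numerology_alt (name : String) : Int :=
  let total := (((PySem.Str.upper name).toList.filter (fun c => 'A' ≤ c && c ≤ 'Z')).map
    (fun c => PySem.Int.mod ((c.toNat : Int) - ('A'.toNat : Int)) 9 + 1)).sum
  if total = 0 then 0 else 1 + PySem.Int.mod (total - 1) 9

-- ===== PRECONDITION & SPEC =====
def Spec_calculate_name_numerology (name : String) (out : Int) : Prop := out = calculate_name_numerology_alt name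
instance (name : String) (out : Int) : Decidable (Spec_calculate_name_numerology name out) := by unfold Spec_calculate_name_numerology; infer_instance

-- ===== CLAIM (what is proved, stated in full; the proofs are below) =====
def Claim_equal_calculate_name_numerology : Prop := ∀ (name : String), Dom_calculate_name_numerology name → Spec_calculate_name_numerology name (calculate_name_numerology name)

-- ===== LEMMAS AND PROOFS =====

-- the dict lookup of A is exactly B's arithmetic formula on A..Z, and none elsewhere
lemma pvConvGet (c : Char) : pvLetterConversions.get? c =
    if ('A' ≤ c && c ≤ 'Z') then some (PySem.Int.mod ((c.toNat : Int) - ('A'.toNat : Int)) 9 + 1) else none := by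
  have heq : ∀ (d : Char), (d == c) = (d.toNat == c.toNat) := by
    intro d
    by_cases h : d = c
    · subst h
      rw [beq_self_eq_true, beq_self_eq_true]
    · have h2 : d.toNat ≠ c.toNat := fun hc => h (Char.ext (UInt32.toNat_inj.mp hc))
      simp [h, h2]
  have hitems : pvLetterConversions.items =
      [('A',(1:Int)),('B',2),('C',3),('D',4),('E',5),('F',6),('G',7),('H',8),('I',9),('J',1),('K',2),('L',3),
       ('M',4),('N',5),('O',6),('P',7),('Q',8),('R',9),('S',1),('T',2),('U',3),('V',4),('W',5),('X',6),
       ('Y',7),('Z',8)] := by decide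
  have hcond : ('A' ≤ c && c ≤ 'Z') = (decide (65 ≤ c.toNat) && decide (c.toNat ≤ 90)) := rfl
  rw [hcond]
  simp only [PySem.Dict.get?, hitems]
  simp only [heq]
  by_cases h1 : 65 ≤ c.toNat ∧ c.toNat ≤ 90
  · rcases h1 with ⟨ha, hb⟩
    revert ha hb
    generalize c.toNat = n
    intro ha hb
    interval_cases n <;> decide
  · have h2 : List.find? (fun p => p.1.toNat == c.toNat)
        [('A',(1:Int)),('B',2),('C',3),('D',4),('E',5),('F',6),('G',7),('H',8),('I',9),('J',1),('K',2),('L',3),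
         ('M',4),('N',5),('O',6),('P',7),('Q',8),('R',9),('S',1),('T',2),('U',3),('V',4),('W',5),('X',6),
         ('Y',7),('Z',8)] = none := by
      rw [List.find?_eq_none]
      intro x hx
      fin_cases hx <;> simpa using by omega
    rw [h2, if_neg]
    · rfl
    · simp only [Bool.and_eq_true, decide_eq_true_eq]
      omega

-- A's filterMap-over-the-dict sum equals B's filter/map sum
lemma pvSumEq (l : List Char) :
    (l.filterMap (fun c => pvLetterConversions.get? c)).sum
      = ((l.filter (fun c => 'A' ≤ c && c ≤ 'Z')).map
          (fun c => PySem.Int.mod ((c.toNat : Int) - ('A'.toNat : Int)) 9 + 1)).sum := by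
  induction l with
  | nil => rfl
  | cons c l ih =>
    rw [List.filterMap_cons, List.filter_cons, pvConvGet c]
    by_cases h : ('A' ≤ c && c ≤ 'Z') = true
    · simp [h, ih]
    · simp [h, ih]

lemma pvTotalNonneg (l : List Char) :
    0 ≤ ((l.filter (fun c => 'A' ≤ c && c ≤ 'Z')).map
          (fun c => PySem.Int.mod ((c.toNat : Int) - ('A'.toNat : Int)) 9 + 1)).sum := by
  induction l with
  | nil => simp
  | cons c l ih =>
    rw [List.filter_cons]
    by_cases h : ('A' ≤ c && c ≤ 'Z') = true
    · rw [if_pos h, List.map_cons, List.sum_cons]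
      have h1 := PySem.Int.mod_nonneg ((c.toNat : Int) - ('A'.toNat : Int)) (b := 9) (by norm_num)
      linarith
    · rw [if_neg h]
      exact ih

lemma pvIntOfDigitChar (r : Nat) (h : r < 10) : pvIntOfDigit (Nat.digitChar r) = (r : Int) := by
  interval_cases r <;> decide

lemma pvToDigitsCoreSum (f : Nat) : ∀ (n : Nat) (l : List Char), n < f →
    ((Nat.toDigitsCore 10 f n l).map pvIntOfDigit).sum
      = ((Nat.digits 10 n).sum : Int) + (l.map pvIntOfDigit).sum := by
  induction f with
  | zero => intro n l h; omega
  | succ f ih =>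
    intro n l h
    show ((if n / 10 = 0 then (n % 10).digitChar :: l
            else Nat.toDigitsCore 10 f (n / 10) ((n % 10).digitChar :: l)).map pvIntOfDigit).sum = _
    by_cases h0 : n / 10 = 0
    · rw [if_pos h0, List.map_cons, List.sum_cons, pvIntOfDigitChar _ (by omega)]
      by_cases hn : n = 0
      · subst hn; simp
      · rw [Nat.digits_def' (by norm_num : (1:Nat) < 10) (by omega), h0]
        simp
    · rw [if_neg h0, ih (n / 10) _ (by omega)]
      rw [Nat.digits_def' (b := 10) (by norm_num) (n := n) (by omega)]
      rw [List.map_cons, List.sum_cons, pvIntOfDigitChar _ (by omega), List.sum_cons]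
      push_cast
      omega

lemma pvDigitSumEq (n : Int) (h : 0 ≤ n) : pvDigitSum n = ((Nat.digits 10 n.toNat).sum : Int) := by
  unfold pvDigitSum PySem.Int.toChars
  rw [if_neg (by omega), Nat.toDigits]
  rw [pvToDigitsCoreSum (n.toNat + 1) n.toNat [] (by omega)]
  simp

lemma pvDsumLt (n : Nat) (h : 10 ≤ n) : (Nat.digits 10 n).sum < n := by
  rw [Nat.digits_def' (by norm_num : (1:Nat) < 10) (by omega)]
  rw [List.sum_cons]
  have h1 := Nat.digit_sum_le 10 (n / 10)
  omega

lemma pvDsumPos : ∀ n : Nat, 0 < n → 0 < (Nat.digits 10 n).sum := by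
  intro n
  induction n using Nat.strong_induction_on with
  | _ n ih =>
    intro h
    rw [Nat.digits_def' (by norm_num : (1:Nat) < 10) h, List.sum_cons]
    by_cases h0 : n % 10 = 0
    · have hq : 0 < n / 10 := by omega
      have := ih (n / 10) (by omega) hq
      omega
    · omega

-- the digital root as B computes it
def pvDroot (s : Int) : Int := if s = 0 then 0 else 1 + PySem.Int.mod (s - 1) 9

lemma pvReduceEq : ∀ (f : Nat) (s : Int), 0 ≤ s → s < (f : Int) → pvReduce f s = pvDroot s := by
  intro f
  induction f with
  | zero => intro s h1 h2; exact absurd h2 (by omega)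
  | succ f ih =>
    intro s h1 h2
    rw [pvReduce]
    by_cases h9 : 9 < s
    · rw [if_pos h9]
      rw [pvDigitSumEq s h1]
      have hlt : (Nat.digits 10 s.toNat).sum < s.toNat := pvDsumLt _ (by omega)
      have hpos : 0 < (Nat.digits 10 s.toNat).sum := pvDsumPos _ (by omega)
      have hmod : s.toNat % 9 = (Nat.digits 10 s.toNat).sum % 9 :=
        Nat.modEq_digits_sum 9 10 (by norm_num) s.toNat
      rw [ih _ (by omega) (by omega)]
      unfold pvDroot
      rw [if_neg (by omega), if_neg (by omega)]
      rw [PySem.Int.mod_eq_emod_of_pos (by norm_num), PySem.Int.mod_eq_emod_of_pos (by norm_num)]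
      omega
    · rw [if_neg h9]
      unfold pvDroot
      by_cases h0 : s = 0
      · simp [h0]
      · rw [if_neg h0, PySem.Int.mod_eq_emod_of_pos (by norm_num)]
        omega

-- ===== VERDICT (by name: the statement is the Claim_ definition above) =====
theorem calculate_name_numerology_spec : Claim_equal_calculate_name_numerology := by
  intro name _
  unfold Spec_calculate_name_numerology
  simp only [calculate_name_numerology, calculate_name_numerology_alt]
  rw [pvSumEq]
  have h0 := pvTotalNonneg (PySem.Str.upper name).toList
  rw [pvReduceEq _ _ h0 (by omega)]
  rfl
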